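-- pv_equiv track=rewrite | github.com/JoaoPauloFialho/Calculo-de-rede-IPV4 | calculoderedes.py | _ip_broadcast_trans
-- ===== SOURCE A (Python) =====
-- def _ip_broadcast_trans(ip):
--     ip_broadcast = []
--     for i, c in enumerate(ip):
--         if i >= 2:
--             ip_broadcast.append('0')
--         else:
--             ip_broadcast.append(c)
--     return ''.join(ip_broadcast)
-- ===== SOURCE B (Python) =====
-- def _ip_broadcast_trans(ip):
--     return ip[:2] + '0' * (len(ip) - 2)
-- ===== Notes on version B (the rewrite author's own statement) =====
-- stated objective: simpler
-- what changed: Replaces the per-character enumerate loop with conditional appends by a closed form: slice off the first two characters and concatenate a zero-filled tail built by string multiplication.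
import Mathlib
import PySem

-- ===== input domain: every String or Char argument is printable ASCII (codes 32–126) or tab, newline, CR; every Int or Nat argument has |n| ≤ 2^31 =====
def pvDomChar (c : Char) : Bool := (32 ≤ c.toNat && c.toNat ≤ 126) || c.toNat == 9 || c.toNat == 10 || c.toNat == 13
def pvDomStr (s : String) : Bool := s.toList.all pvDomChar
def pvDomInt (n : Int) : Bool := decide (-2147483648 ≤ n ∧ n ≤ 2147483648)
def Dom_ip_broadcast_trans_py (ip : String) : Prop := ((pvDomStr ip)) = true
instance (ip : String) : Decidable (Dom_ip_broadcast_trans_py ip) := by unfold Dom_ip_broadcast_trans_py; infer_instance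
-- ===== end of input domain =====

-- B replaces A's per-character enumerate loop by a closed form: keep ip[:2] and append '0' * (len(ip) - 2); objective: simpler.

-- ===== PORT A =====
-- for i, c in enumerate(ip): append '0' if i >= 2 else c; then ''.join
def pvLoopA : Nat → List Char → List Char → List Char
  | _, acc, [] => acc
  | i, acc, c :: rest => pvLoopA (i + 1) (acc ++ [if i ≥ 2 then '0' else c]) rest

def ip_broadcast_trans_py (ip : String) : String :=
  String.ofList (pvLoopA 0 [] ip.toList)

-- ===== PORT B =====
-- return ip[:2] + '0' * (len(ip) - 2)
def ip_broadcast_trans_py_alt (ip : String) : String :=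
  String.ofList (PySem.List.slice ip.toList none (some 2) ++
             PySem.List.pyRepeat ['0'] ((ip.toList.length : Int) - 2))

-- ===== PRECONDITION & SPEC =====
def Spec_ip_broadcast_trans_py (ip : String) (out : String) : Prop := out = ip_broadcast_trans_py_alt ip
instance (ip : String) (out : String) : Decidable (Spec_ip_broadcast_trans_py ip out) := by unfold Spec_ip_broadcast_trans_py; infer_instance

-- ===== CLAIM (what is proved, stated in full; the proofs are below) =====
def Claim_equal_ip_broadcast_trans_py : Prop := ∀ (ip : String), Dom_ip_broadcast_trans_py ip → Spec_ip_broadcast_trans_py ip (ip_broadcast_trans_py ip)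

-- ===== LEMMAS AND PROOFS =====
-- Once the index is ≥ 2, A's loop only appends '0's.
theorem pvLoopA_ge_two (l : List Char) : ∀ (i : Nat) (acc : List Char), 2 ≤ i →
    pvLoopA i acc l = acc ++ List.replicate l.length '0' := by
  induction l with
  | nil => intro i acc _; simp [pvLoopA]
  | cons c rest ih =>
    intro i acc hi
    simp only [pvLoopA, if_pos hi, List.length_cons, List.replicate_succ]
    rw [ih (i + 1) _ (by omega)]
    simp

-- ===== VERDICT (by name: the statement is the Claim_ definition above) =====
theorem ip_broadcast_trans_py_spec : Claim_equal_ip_broadcast_trans_py := by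
  intro ip _
  unfold Spec_ip_broadcast_trans_py ip_broadcast_trans_py ip_broadcast_trans_py_alt
  match h : ip.toList with
  | [] => simp [pvLoopA, PySem.List.slice, PySem.List.pyRepeat]
  | [a] => simp [pvLoopA, PySem.List.slice, PySem.List.pyRepeat]
  | a :: b :: rest =>
    rw [pvLoopA, pvLoopA, pvLoopA_ge_two rest 2 _ (by omega)]
    have h2 : PySem.List.slice (a :: b :: rest) none (some 2) = (a :: b :: rest).take 2 :=
      PySem.List.slice_to _ (by omega)
    have h3 : ((a :: b :: rest).length : Int) - 2 = (rest.length : Nat) := by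
      simp; omega
    rw [h2, h3]
    simp [PySem.List.pyRepeat_singleton]
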